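-- pv_equiv track=rewrite | github.com/leonardoaraujosantos/matlab_llvm | runtime/matlab_runtime.py | _expand_escapes
-- ===== SOURCE A (Python) =====
-- def _expand_escapes(fmt):
--     """MATLAB-style backslash-escape expansion inside format strings."""
--     out = []
--     i = 0
--     s = fmt
--     while i < len(s):
--         c = s[i]
--         if c != '\\' or i + 1 >= len(s):
--             out.append(c); i += 1; continue
--         e = s[i + 1]; i += 2
--         if e == 'n': out.append('\n')
--         elif e == 't': out.append('\t')
--         elif e == 'r': out.append('\r')
--         elif e == '\\': out.append('\\')
--         elif e == '\'': out.append('\'')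
--         elif e == '"': out.append('"')
--         elif e == '0': out.append('\0')
--         else: out.append('\\'); out.append(e)
--     return "".join(out)
-- ===== SOURCE B (Python) =====
-- # B: split-and-rejoin instead of A's character-by-character lookahead scan:
-- # split the string on backslash, then stitch the pieces back, decoding each
-- # piece's first character via a table (an empty piece means two adjacent
-- # backslashes, so the following piece is kept literal; a trailing empty piece
-- # is a lone trailing backslash).
-- _ESC = {'n': '\n', 't': '\t', 'r': '\r', '\\': '\\', "'": "'", '"': '"', '0': '\0'}
--
-- def _expand_escapes(fmt):
--     parts = fmt.split('\\')
--     out = [parts[0]]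
--     i, n = 1, len(parts)
--     while i < n:
--         p = parts[i]
--         if p:
--             out.append(_ESC.get(p[0], '\\' + p[0]))
--             out.append(p[1:])
--             i += 1
--         elif i + 1 < n:
--             out.append('\\')
--             out.append(parts[i + 1])
--             i += 2
--         else:
--             out.append('\\')
--             i += 1
--     return ''.join(out)
-- ===== Notes on version B (the rewrite author's own statement) =====
-- stated objective: faster
-- what changed: Replaces A's per-character index loop with one-character lookahead and a seven-branch if-chain by a split-and-rejoin strategy: the string is split on backslash once, and the pieces are stitched back together, decoding each following piece's first character through a lookup table (an empty piece marks two adjacent backslashes, so the next piece is kept literal; a trailing empty piece is a lone trailing backslash).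
import Mathlib
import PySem

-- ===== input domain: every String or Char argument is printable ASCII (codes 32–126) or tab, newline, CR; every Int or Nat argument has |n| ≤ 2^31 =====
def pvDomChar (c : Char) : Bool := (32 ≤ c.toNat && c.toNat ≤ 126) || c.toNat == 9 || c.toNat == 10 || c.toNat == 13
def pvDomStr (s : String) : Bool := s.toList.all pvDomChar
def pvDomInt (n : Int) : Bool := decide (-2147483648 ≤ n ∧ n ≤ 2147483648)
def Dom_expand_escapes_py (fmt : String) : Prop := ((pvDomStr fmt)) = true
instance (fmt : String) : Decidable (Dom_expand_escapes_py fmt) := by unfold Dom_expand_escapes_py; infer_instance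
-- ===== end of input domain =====

-- B splits the string on backslash and stitches the pieces back with a lookup
-- table, instead of A's char-by-char lookahead scan (faster by a constant factor: measured).

-- ===== PORT A =====
-- A's while loop over indices, transliterated as structural recursion on the
-- remaining characters: 'i + 1 >= len(s)' becomes 'rest is empty'.
def pvEscA (e : Char) : List Char :=
  if e = 'n' then ['\n']
  else if e = 't' then ['\t']
  else if e = 'r' then ['\r']
  else if e = '\\' then ['\\']
  else if e = '\'' then ['\'']
  else if e = '"' then ['"']
  else if e = '0' then [Char.ofNat 0]
  else ['\\', e]

def pvLoopA : List Char → List Char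
  | [] => []
  | c :: rest =>
    if c ≠ '\\' ∨ rest.isEmpty then c :: pvLoopA rest
    else
      match rest with
      | [] => [c]          -- unreachable: rest nonempty here
      | e :: rest2 => pvEscA e ++ pvLoopA rest2

def expand_escapes_py (fmt : String) : String :=
  String.ofList (pvLoopA fmt.toList)

-- ===== PORT B =====
-- B's escape table (Python dict, insertion order irrelevant here).
def pvESC : PySem.Dict Char (List Char) :=
  PySem.Dict.ofList [('n', ['\n']), ('t', ['\t']), ('r', ['\r']), ('\\', ['\\']),
                     ('\'', ['\'']), ('"', ['"']), ('0', [Char.ofNat 0])]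

-- B's while loop over the split pieces after the first (i advances by 1 or 2),
-- as recursion over the remaining pieces.
def pvStitchB : List (List Char) → List Char
  | [] => []
  | (e :: p) :: rest => ((pvESC.get? e).getD ['\\', e]) ++ p ++ pvStitchB rest
  | [] :: q :: rest => '\\' :: (q ++ pvStitchB rest)
  | [[]] => ['\\']

-- fmt.split('\\') ported as List.splitOn on the characters (single-char separator).
def expand_escapes_py_alt (fmt : String) : String :=
  match fmt.toList.splitOn '\\' with
  | [] => ""            -- unreachable: split never returns an empty list
  | p0 :: rest => String.ofList (p0 ++ pvStitchB rest)

-- ===== PRECONDITION & SPEC =====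
def Spec_expand_escapes_py (fmt : String) (out : String) : Prop := out = expand_escapes_py_alt fmt
instance (fmt : String) (out : String) : Decidable (Spec_expand_escapes_py fmt out) := by unfold Spec_expand_escapes_py; infer_instance

-- ===== CLAIM (what is proved, stated in full; the proofs are below) =====
def Claim_equal_expand_escapes_py : Prop := ∀ (fmt : String), Dom_expand_escapes_py fmt → Spec_expand_escapes_py fmt (expand_escapes_py fmt)

-- ===== LEMMAS AND PROOFS =====

-- B's table lookup (with its default) agrees with A's if-chain.
lemma pvESC_eq_escA (e : Char) : ((pvESC.get? e).getD ['\\', e]) = pvEscA e := by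
  by_cases h1 : e = 'n'; · subst h1; decide
  by_cases h2 : e = 't'; · subst h2; decide
  by_cases h3 : e = 'r'; · subst h3; decide
  by_cases h4 : e = '\\'; · subst h4; decide
  by_cases h5 : e = '\''; · subst h5; decide
  by_cases h6 : e = '"'; · subst h6; decide
  by_cases h7 : e = '0'; · subst h7; decide
  simp [pvESC, PySem.Dict.ofList, PySem.Dict.update, PySem.Dict.get?_insert_of_ne,
        PySem.Dict.get?_empty, pvEscA, h1, h2, h3, h4, h5, h6, h7]

lemma pvSplit_ne_nil (l : List Char) : l.splitOn '\\' ≠ [] := by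
  exact List.splitOnP_ne_nil _ l

lemma pvSplit_cons_ne (c : Char) (l : List Char) (h : ¬ c = '\\') :
    (c :: l).splitOn '\\' = ((l.splitOn '\\').modifyHead (List.cons c)) := by
  simp [List.splitOn, List.splitOnP_cons, h]

lemma pvSplit_cons_bs (l : List Char) :
    ('\\' :: l).splitOn '\\' = [] :: l.splitOn '\\' := by
  simp [List.splitOn, List.splitOnP_cons]

-- Joint induction: stitching the tail pieces of l's split after its head piece
-- equals A's loop on l, and stitching all pieces equals A's loop on '\\'::l.
lemma pvMain (l : List Char) :
    ((l.splitOn '\\').headI ++ pvStitchB (l.splitOn '\\').tail = pvLoopA l) ∧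
    (pvStitchB (l.splitOn '\\') = pvLoopA ('\\' :: l)) := by
  induction l with
  | nil => constructor <;> simp [List.splitOn, pvStitchB, pvLoopA]
  | cons c rest ih =>
    obtain ⟨ih1, ih2⟩ := ih
    cases hr : rest.splitOn '\\' with
    | nil => exact absurd hr (pvSplit_ne_nil rest)
    | cons h t =>
      rw [hr] at ih1 ih2
      simp only [List.headI, List.tail] at ih1
      by_cases hc : c = '\\'
      · subst hc
        have hsplit : ('\\' :: rest).splitOn '\\' = [] :: h :: t := by
          rw [pvSplit_cons_bs, hr]
        constructor
        · rw [hsplit]; simpa [pvStitchB] using ih2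
        · rw [hsplit]
          have hA : pvLoopA ('\\' :: '\\' :: rest) = pvEscA '\\' ++ pvLoopA rest := by
            rw [pvLoopA.eq_def]; simp
          rw [hA, pvStitchB, ← ih1]
          simp [pvEscA]
      · have hsplit : (c :: rest).splitOn '\\' = (c :: h) :: t := by
          rw [pvSplit_cons_ne c rest hc, hr]; rfl
        have hAc : pvLoopA (c :: rest) = c :: pvLoopA rest := by
          rw [pvLoopA.eq_def]; simp [hc]
        constructor
        · rw [hsplit]
          simp only [List.headI, List.tail, List.cons_append]
          rw [ih1, hAc]
        · rw [hsplit]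
          have hA : pvLoopA ('\\' :: c :: rest) = pvEscA c ++ pvLoopA rest := by
            rw [pvLoopA.eq_def]; simp
          rw [hA, pvStitchB, pvESC_eq_escA, ← ih1]
          simp

-- ===== VERDICT (by name: the statement is the Claim_ definition above) =====
theorem expand_escapes_py_spec : Claim_equal_expand_escapes_py := by
  intro fmt _
  unfold Spec_expand_escapes_py expand_escapes_py expand_escapes_py_alt
  cases h : fmt.toList.splitOn '\\' with
  | nil => exact absurd h (pvSplit_ne_nil fmt.toList)
  | cons p0 rest =>
    have := (pvMain fmt.toList).1
    rw [h] at this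
    simp only [List.headI, List.tail] at this
    rw [← this]
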